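-- pv_equiv track=rewrite | github.com/lgrandco/codeforces | round_1035_div_2/c.py | get_next_2_power
-- ===== SOURCE A (Python) =====
-- def get_next_2_power(l, r):
--     if l > r:
--         return -1
--     power = 1
--     while power <= l:
--         power *= 2
--     if power > r:
--         return -1
--     return power
-- ===== SOURCE B (Python) =====
-- def get_next_2_power(l, r):
--     if l > r:
--         return -1
--     power = 1 << max(l, 0).bit_length()
--     return -1 if power > r else power
-- ===== Notes on version B (the rewrite author's own statement) =====
-- stated objective: idiomatic
-- what changed: Replaces the doubling while-loop with a closed-form bit computation: 1 << max(l,0).bit_length() is the smallest power of two strictly greater than l.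
import Mathlib
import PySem

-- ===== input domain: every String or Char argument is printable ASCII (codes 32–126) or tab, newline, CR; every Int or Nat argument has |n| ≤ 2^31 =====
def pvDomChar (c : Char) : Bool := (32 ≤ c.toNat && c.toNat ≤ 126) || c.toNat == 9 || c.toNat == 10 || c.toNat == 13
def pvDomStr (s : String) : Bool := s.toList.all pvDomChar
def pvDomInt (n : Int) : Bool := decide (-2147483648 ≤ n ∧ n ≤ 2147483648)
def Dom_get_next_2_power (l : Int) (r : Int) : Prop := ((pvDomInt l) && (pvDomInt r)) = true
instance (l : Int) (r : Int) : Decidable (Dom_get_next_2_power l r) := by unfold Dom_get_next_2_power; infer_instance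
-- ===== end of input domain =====

-- B replaces A's doubling while-loop by the closed-form bit-length computation (O(1) instead of O(log l)).

-- ===== PORT A =====
-- the Python while-loop 'while power <= l: power *= 2'; A enters it with power = 1,
-- hence the 1 ≤ power hypothesis (needed only for termination)
def pvLoopA (l : Int) (power : Int) (h : 1 ≤ power) : Int :=
  if hle : power ≤ l then
    pvLoopA l (power * 2) (by omega)
  else
    power
termination_by (l + 1 - power).toNat
decreasing_by
  omega

def get_next_2_power (l : Int) (r : Int) : Int :=
  if l > r then -1
  else
    let power := pvLoopA l 1 (by norm_num)
    if power > r then -1 else power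

-- ===== PORT B =====
-- Python int.bit_length for a nonnegative value
def pvBitLength (n : Nat) : Nat := if n = 0 then 0 else n.log2 + 1

def get_next_2_power_alt (l : Int) (r : Int) : Int :=
  if l > r then -1
  else
    let power : Int := 2 ^ pvBitLength (max l 0).toNat
    if power > r then -1 else power

-- ===== PRECONDITION & SPEC =====
def Spec_get_next_2_power (l : Int) (r : Int) (out : Int) : Prop := out = get_next_2_power_alt l r
instance (l : Int) (r : Int) (out : Int) : Decidable (Spec_get_next_2_power l r out) := by unfold Spec_get_next_2_power; infer_instance

-- ===== CLAIM (what is proved, stated in full; the proofs are below) =====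
def Claim_equal_get_next_2_power : Prop := ∀ (l : Int) (r : Int), Dom_get_next_2_power l r → Spec_get_next_2_power l r (get_next_2_power l r)

-- ===== LEMMAS AND PROOFS =====

theorem pvLoopA_congr (l : Int) (p q : Int) (hp : 1 ≤ p) (hq : 1 ≤ q) (h : p = q) :
    pvLoopA l p hp = pvLoopA l q hq := by subst h; rfl

-- pvLoopA starting from 2^k returns 2^(max k (bitLength l.toNat))
theorem pvLoopA_pow (l : Int) (k : Nat) (h : (1:Int) ≤ 2 ^ k) :
    pvLoopA l (2 ^ k) h = 2 ^ max k (pvBitLength l.toNat) := by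
  unfold pvLoopA
  split
  · rename_i hle
    rw [pvLoopA_congr l (2 ^ k * 2) (2 ^ (k+1)) (by omega) (one_le_pow₀ (by norm_num)) (by ring)]
    rw [pvLoopA_pow l (k+1) (one_le_pow₀ (by norm_num))]
    -- from 2^k ≤ l we get k + 1 ≤ bitLength l.toNat
    have hl1 : (1:Int) ≤ l := le_trans h hle
    have hn : 2 ^ k ≤ l.toNat := by
      have : (2:Int)^k = ((2^k : Nat) : Int) := by push_cast; ring
      omega
    have hb : k + 1 ≤ pvBitLength l.toNat := by
      unfold pvBitLength
      have hpos : 0 < l.toNat := by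
        have := Nat.one_le_two_pow (n := k); omega
      rw [if_neg (by omega)]
      have : k ≤ Nat.log2 l.toNat := (Nat.le_log2 (by omega)).mpr hn
      omega
    rw [Nat.max_eq_right (by omega), Nat.max_eq_right (by omega)]
  · rename_i hle
    -- l < 2^k, so bitLength l.toNat ≤ k
    have hn : l.toNat < 2 ^ k := by
      have : (2:Int)^k = ((2^k : Nat) : Int) := by push_cast; ring
      have h2 : 0 < (2:Nat)^k := Nat.two_pow_pos k
      omega
    have hb : pvBitLength l.toNat ≤ k := by
      unfold pvBitLength
      split
      · omega
      · rename_i h0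
        have : Nat.log2 l.toNat < k := (Nat.log2_lt (by omega)).mpr hn
        omega
    rw [Nat.max_eq_left hb]
termination_by (l + 1 - 2 ^ k).toNat
decreasing_by
  have := le_trans h (by assumption : (2:Int)^k ≤ l)
  omega

theorem pvLoopA_eq (l : Int) : pvLoopA l 1 (by norm_num) = 2 ^ pvBitLength (max l 0).toNat := by
  have := pvLoopA_pow l 0 (by norm_num)
  simp only [pow_zero] at this
  rw [this]
  have : (max l 0).toNat = l.toNat := by omega
  rw [this]
  have hb : max 0 (pvBitLength l.toNat) = pvBitLength l.toNat := Nat.max_eq_right (Nat.zero_le _)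
  rw [hb]

-- ===== VERDICT (by name: the statement is the Claim_ definition above) =====
theorem get_next_2_power_spec : Claim_equal_get_next_2_power := by
  intro l r _
  unfold Spec_get_next_2_power get_next_2_power get_next_2_power_alt
  rw [pvLoopA_eq]
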